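-- pv_equiv track=rewrite | github.com/ayush286/AlgoExpert | SameBsts.py | getRangeIndexesRootMinus
-- ===== SOURCE A (Python) =====
-- def getRangeIndexesRootMinus(array):
-- 	rangeIndexes = [0]
-- 	currentSmallest = array[0]
-- 	for index in range(1, len(array)):
-- 		if array[index] <= currentSmallest:
-- 			rangeIndexes.append(index)
-- 			currentSmallest = array[index]
-- 	return rangeIndexes
-- ===== SOURCE B (Python) =====
-- def getRangeIndexesRootMinus(array):
-- 	mins = []
-- 	m = array[0]
-- 	for x in array:
-- 		m = x if x < m else m
-- 		mins.append(m)
-- 	return [0] + [i for i in range(1, len(array)) if array[i] <= mins[i - 1]]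
-- ===== Notes on version B (the rewrite author's own statement) =====
-- stated objective: alternative
-- what changed: B first builds a prefix-minimum table over the whole array in one pass and then selects indices in a separate filtering pass (array[i] <= mins[i-1]), instead of A's single loop that updates a running minimum while collecting indices.
import Mathlib
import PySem

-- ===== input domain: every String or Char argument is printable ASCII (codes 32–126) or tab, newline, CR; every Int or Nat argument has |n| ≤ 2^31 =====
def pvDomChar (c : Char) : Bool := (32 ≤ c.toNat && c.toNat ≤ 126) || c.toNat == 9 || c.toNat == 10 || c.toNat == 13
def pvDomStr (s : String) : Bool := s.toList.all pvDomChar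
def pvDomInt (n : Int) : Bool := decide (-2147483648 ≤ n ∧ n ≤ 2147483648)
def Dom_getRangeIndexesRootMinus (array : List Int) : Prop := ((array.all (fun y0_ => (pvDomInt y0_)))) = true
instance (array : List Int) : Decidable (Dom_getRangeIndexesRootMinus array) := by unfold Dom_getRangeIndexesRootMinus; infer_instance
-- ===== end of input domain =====

-- B builds a prefix-minimum table first and then selects indices in a separate
-- filtering pass, instead of A's single collecting loop with a running minimum.
-- (Equivalence on nonempty lists; both raise IndexError on an empty list.)

-- ===== PORT A =====
def getRangeIndexesRootMinus (array : List Int) : List Int :=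
  (((PySem.List.pyRange 1 (array.length : Int) 1).foldl
    (fun (st : List Int × Int) index =>
      if PySem.List.pyGetD array index 0 ≤ st.2 then
        (st.1 ++ [index], PySem.List.pyGetD array index 0)
      else st)
    ([0], PySem.List.pyGetD array 0 0))).1

-- ===== PORT B =====
def getRangeIndexesRootMinus_alt (array : List Int) : List Int :=
  let mins := (array.foldl
    (fun (p : List Int × Int) x =>
      let m' := if x < p.2 then x else p.2
      (p.1 ++ [m'], m'))
    ([], PySem.List.pyGetD array 0 0)).1
  [0] ++ (PySem.List.pyRange 1 (array.length : Int) 1).filter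
    (fun i => decide (PySem.List.pyGetD array i 0 ≤ PySem.List.pyGetD mins (i - 1) 0))

-- ===== PRECONDITION & SPEC =====
-- Python A indexes the first element, which raises IndexError on an empty list; Pre_ excludes it (B raises there too).
def Pre_getRangeIndexesRootMinus (array : List Int) : Prop := array ≠ []
instance (array : List Int) : Decidable (Pre_getRangeIndexesRootMinus array) := by unfold Pre_getRangeIndexesRootMinus; infer_instance
def pvWitness_getRangeIndexesRootMinus : List Int := [3, 1, 2]

def Spec_getRangeIndexesRootMinus (array : List Int) (out : List Int) : Prop := out = getRangeIndexesRootMinus_alt array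
instance (array : List Int) (out : List Int) : Decidable (Spec_getRangeIndexesRootMinus array out) := by unfold Spec_getRangeIndexesRootMinus; infer_instance

-- ===== CLAIM (what is proved, stated in full; the proofs are below) =====
def Claim_equal_getRangeIndexesRootMinus : Prop := ∀ (array : List Int), Dom_getRangeIndexesRootMinus array → Pre_getRangeIndexesRootMinus array → Spec_getRangeIndexesRootMinus array (getRangeIndexesRootMinus array)

-- ===== LEMMAS AND PROOFS =====

-- prefix-minimum list (B's `mins`) as a structural recursion
def pmList (m : Int) : List Int → List Int
  | [] => []
  | x :: xs => (if x < m then x else m) :: pmList (if x < m then x else m) xs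

-- running minimum after consuming a prefix
def roll (m : Int) (xs : List Int) : Int :=
  xs.foldl (fun m x => if x < m then x else m) m

-- common abstract result: indices selected from position i on, running min cur
def walk (cur : Int) (i : Int) : List Int → List Int
  | [] => []
  | x :: xs => if x ≤ cur then i :: walk x (i + 1) xs else walk cur (i + 1) xs

theorem pmList_length (m : Int) (xs : List Int) : (pmList m xs).length = xs.length := by
  induction xs generalizing m with
  | nil => rfl
  | cons x xs ih => simp [pmList, ih]

theorem foldB (xs : List Int) : ∀ (acc : List Int) (m : Int),
    (xs.foldl (fun (p : List Int × Int) x =>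
        let m' := if x < p.2 then x else p.2
        (p.1 ++ [m'], m')) (acc, m)).1 = acc ++ pmList m xs := by
  induction xs with
  | nil => intro acc m; simp [pmList]
  | cons x xs ih => intro acc m; simp [pmList, ih, List.append_assoc]

theorem pmList_append (m : Int) (pre ys : List Int) :
    pmList m (pre ++ ys) = pmList m pre ++ pmList (roll m pre) ys := by
  induction pre generalizing m with
  | nil => simp [pmList, roll]
  | cons y t ih => simp [pmList, roll, ih, roll]

theorem pmList_last (pre : List Int) : ∀ (m : Int), pre ≠ [] →
    (pmList m pre).getLast? = some (roll m pre) := by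
  induction pre with
  | nil => intro m h; exact absurd rfl h
  | cons y t ih =>
    intro m _
    cases t with
    | nil => simp [pmList, roll]
    | cons w t' =>
      have hih := ih (if y < m then y else m) (by simp)
      simp only [pmList] at hih ⊢
      rw [List.getLast?_cons_cons, hih]
      simp only [roll, List.foldl_cons]

theorem pyGetD_pmList (m : Int) (pre ys : List Int) (h : pre ≠ []) :
    PySem.List.pyGetD (pmList m (pre ++ ys)) ((pre.length : Int) - 1) 0 = roll m pre := by
  have hlen : 0 < pre.length := List.length_pos_iff.mpr h
  have hcast : ((pre.length : Int) - 1) = ((pre.length - 1 : Nat) : Int) := by omega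
  rw [pmList_append, hcast, PySem.List.pyGetD_natCast]
  have hlt : pre.length - 1 < (pmList m pre).length := by rw [pmList_length]; omega
  rw [List.getD_eq_getElem?_getD, List.getElem?_append_left hlt]
  have h1 : (pmList m pre)[pre.length - 1]? = (pmList m pre).getLast? := by
    rw [List.getLast?_eq_getElem?, pmList_length]
  rw [h1, pmList_last pre m h]
  rfl

theorem pyGetD_at (pre : List Int) (x : Int) (xs : List Int) :
    PySem.List.pyGetD (pre ++ x :: xs) (pre.length : Int) 0 = x := by
  rw [PySem.List.pyGetD_natCast, List.getD_eq_getElem?_getD,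
    List.getElem?_append_right (le_refl pre.length)]
  simp

theorem foldA (array : List Int) : ∀ (ys pre acc : List Int) (cur : Int),
    array = pre ++ ys →
    ((PySem.List.pyRange (pre.length : Int) (array.length : Int) 1).foldl
      (fun (st : List Int × Int) index =>
        if PySem.List.pyGetD array index 0 ≤ st.2 then
          (st.1 ++ [index], PySem.List.pyGetD array index 0)
        else st) (acc, cur)).1 = acc ++ walk cur (pre.length : Int) ys := by
  intro ys
  induction ys with
  | nil =>
    intro pre acc cur h
    have heq : (array.length : Int) = (pre.length : Int) := by subst h; simp
    rw [heq]
    simp [PySem.List.pyRange, walk]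
  | cons x xs ih =>
    intro pre acc cur h
    have hlt : (pre.length : Int) < (array.length : Int) := by
      rw [h, List.length_append, List.length_cons]; push_cast; omega
    rw [PySem.List.pyRange_one_cons hlt, List.foldl_cons]
    have hx : PySem.List.pyGetD array (pre.length : Int) 0 = x := by
      subst h; exact pyGetD_at pre x xs
    rw [hx]
    have hsucc : ((pre ++ [x]).length : Int) = (pre.length : Int) + 1 := by simp
    by_cases hle : x ≤ cur
    · rw [if_pos hle]
      have := ih (pre ++ [x]) (acc ++ [(pre.length : Int)]) x (by simpa using h)
      rw [hsucc] at this
      rw [this, walk, if_pos hle, List.append_assoc]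
      rfl
    · rw [if_neg hle]
      have := ih (pre ++ [x]) acc cur (by simpa using h)
      rw [hsucc] at this
      rw [this, walk, if_neg hle]

theorem filtB (array : List Int) (mins : List Int)
    (hm : mins = pmList (PySem.List.pyGetD array 0 0) array) :
    ∀ (ys pre : List Int) (cur : Int),
    array = pre ++ ys → pre ≠ [] → cur = roll (PySem.List.pyGetD array 0 0) pre →
    (PySem.List.pyRange (pre.length : Int) (array.length : Int) 1).filter
      (fun i => decide (PySem.List.pyGetD array i 0 ≤ PySem.List.pyGetD mins (i - 1) 0))
    = walk cur (pre.length : Int) ys := by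
  intro ys
  induction ys with
  | nil =>
    intro pre cur h _ _
    have heq : (array.length : Int) = (pre.length : Int) := by subst h; simp
    rw [heq]
    simp [PySem.List.pyRange, walk]
  | cons x xs ih =>
    intro pre cur h hpre hcur
    have hlt : (pre.length : Int) < (array.length : Int) := by
      rw [h, List.length_append, List.length_cons]; push_cast; omega
    rw [PySem.List.pyRange_one_cons hlt, List.filter_cons]
    have hx : PySem.List.pyGetD array (pre.length : Int) 0 = x := by
      subst h; exact pyGetD_at pre x xs
    have hmin : PySem.List.pyGetD mins ((pre.length : Int) - 1) 0 = cur := by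
      rw [hm, h, pyGetD_pmList _ _ _ hpre, hcur, ← h]
    have hsucc : ((pre ++ [x]).length : Int) = (pre.length : Int) + 1 := by simp
    have hroll : roll (PySem.List.pyGetD array 0 0) (pre ++ [x])
        = if x ≤ cur then x else cur := by
      unfold roll at hcur ⊢
      rw [List.foldl_append, ← hcur]
      simp only [List.foldl_cons, List.foldl_nil]
      split_ifs <;> omega
    by_cases hle : x ≤ cur
    · have := ih (pre ++ [x]) x (by simpa using h) (by simp)
        (by rw [hroll, if_pos hle])
      rw [hsucc] at this
      simp only [hx, hmin, hle, decide_true, if_true]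
      rw [this, walk, if_pos hle]
    · have := ih (pre ++ [x]) cur (by simpa using h) (by simp)
        (by rw [hroll, if_neg hle])
      rw [hsucc] at this
      simp only [hx, hmin, hle, decide_false]
      rw [this, walk, if_neg hle]
      simp

-- ===== VERDICT (by name: the statement is the Claim_ definition above) =====
theorem getRangeIndexesRootMinus_spec : Claim_equal_getRangeIndexesRootMinus := by
  intro array _ hpre
  unfold Spec_getRangeIndexesRootMinus getRangeIndexesRootMinus getRangeIndexesRootMinus_alt
  obtain ⟨a, t, rfl⟩ : ∃ a t, array = a :: t := by
    cases array with
    | nil => exact absurd rfl hpre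
    | cons a t => exact ⟨a, t, rfl⟩
  have ha0 : PySem.List.pyGetD (a :: t) (0 : Int) 0 = a := by
    simp [PySem.List.pyGetD, PySem.List.pyIdx?, PySem.List.pyGet?]
  have hA := foldA (a :: t) t [a] [0] (PySem.List.pyGetD (a :: t) (0 : Int) 0) rfl
  have hB := filtB (a :: t) (pmList (PySem.List.pyGetD (a :: t) (0 : Int) 0) (a :: t)) rfl
    t [a] (PySem.List.pyGetD (a :: t) (0 : Int) 0) rfl (by simp)
    (by rw [ha0]; simp [roll])
  simp only [List.length_cons, List.length_nil, Nat.cast_add, Nat.cast_one, zero_add] at hA hB ⊢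
  rw [hA, foldB, List.nil_append, hB]
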